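-- pv_equiv track=rewrite | github.com/miliar/Code_Jam_Webscraper | solutions_python/Problem_2/98.py | numTrains
-- ===== SOURCE A (Python) =====
-- def numTrains(t, A, B): # Finds the number of trains needed to be in A given
--                         # the timetables of A and B
--   deps = [] # Array of times of departuring trains
--   arvs = [] # Array of times of arriving (and ready) trains
--   for i in range(0, len(A)):
--     deps.append(A[i][0])
--   for i in range(0, len(B)):
--     arvs.append(B[i][1]+t)
--   # Arrange the two arrays
--   deps.sort()
--   arvs.sort()
--   # Check all departing trains one by one ...
--   res = 0
--   while len(deps) > 0:
--     if len(arvs) and arvs[0] <= deps[0]: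
--       arvs.pop(0)
--     else:
--       res += 1
--     # Remove the departing train just checked
--     deps.pop(0)
--   # Return the calculated value
--   return res
-- ===== SOURCE B (Python) =====
-- def numTrains(t, A, B):
--     # Two-pointer scan over sorted arrays using indices instead of repeated pop(0).
--     deps = sorted(row[0] for row in A)
--     arvs = sorted(row[1] + t for row in B)
--     j = 0
--     res = 0
--     for d in deps:
--         if j < len(arvs) and arvs[j] <= d:
--             j += 1
--         else:
--             res += 1
--     return res
-- ===== Notes on version B (the rewrite author's own statement) =====
-- stated objective: alternative
-- what changed: Replaces the destructive while-loop that repeatedly pops the front of both sorted lists with a single index-based two-pointer fold over the sorted arrays.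
import Mathlib
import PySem

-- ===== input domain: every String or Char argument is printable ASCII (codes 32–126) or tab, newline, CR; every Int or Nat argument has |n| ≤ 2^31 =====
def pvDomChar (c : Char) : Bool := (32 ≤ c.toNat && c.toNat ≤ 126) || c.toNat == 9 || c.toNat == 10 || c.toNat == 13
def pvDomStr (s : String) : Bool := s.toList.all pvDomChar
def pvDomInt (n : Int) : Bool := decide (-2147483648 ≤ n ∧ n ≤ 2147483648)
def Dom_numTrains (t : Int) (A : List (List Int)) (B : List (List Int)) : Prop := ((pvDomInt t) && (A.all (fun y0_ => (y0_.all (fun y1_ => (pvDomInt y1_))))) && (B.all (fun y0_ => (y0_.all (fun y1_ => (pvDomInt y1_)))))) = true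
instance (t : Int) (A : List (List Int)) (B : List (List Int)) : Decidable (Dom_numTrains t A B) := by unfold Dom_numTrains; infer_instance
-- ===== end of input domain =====

-- ===== PORT A =====
-- B: a two-pointer index fold over the sorted arrays instead of A's destructive pop(0) while-loop.
-- A raises IndexError on a row of A without a 0th entry or a row of B without a 1st entry; Pre_ excludes those.

-- the while-loop of A: pop the front departure each round, popping the front arrival when it is usable
def pvLoopA : List Int → List Int → Int → Int
  | [], _, res => res
  | d :: ds, a :: as, res => if a ≤ d then pvLoopA ds as res else pvLoopA ds (a :: as) (res + 1)
  | _ :: ds, [], res => pvLoopA ds [] (res + 1)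

def numTrains (t : Int) (A : List (List Int)) (B : List (List Int)) : Int :=
  let deps := (PySem.List.pyRange 0 (A.length : Int) 1).foldl
      (fun acc i => acc ++ [PySem.List.pyGetD (PySem.List.pyGetD A i []) 0 0]) []
  let arvs := (PySem.List.pyRange 0 (B.length : Int) 1).foldl
      (fun acc i => acc ++ [PySem.List.pyGetD (PySem.List.pyGetD B i []) 1 0 + t]) []
  let deps := PySem.List.sorted deps (fun x => x) false
  let arvs := PySem.List.sorted arvs (fun x => x) false
  pvLoopA deps arvs 0

-- ===== PORT B =====
-- one step of B's for-loop: state (j, res)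
def pvStepB (arvs : List Int) (s : Nat × Int) (d : Int) : Nat × Int :=
  if h : s.1 < arvs.length then
    if arvs[s.1] ≤ d then (s.1 + 1, s.2) else (s.1, s.2 + 1)
  else (s.1, s.2 + 1)

def numTrains_alt (t : Int) (A : List (List Int)) (B : List (List Int)) : Int :=
  let deps := PySem.List.sorted (A.map (fun r => PySem.List.pyGetD r 0 0)) (fun x => x) false
  let arvs := PySem.List.sorted (B.map (fun r => PySem.List.pyGetD r 1 0 + t)) (fun x => x) false
  (deps.foldl (pvStepB arvs) (0, 0)).2

-- ===== PRECONDITION & SPEC =====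
-- Pre_ excludes exactly the inputs on which A raises IndexError: a row of A with no element
-- (A[i][0]) or a row of B with fewer than two elements (B[i][1]).
def Pre_numTrains (t : Int) (A : List (List Int)) (B : List (List Int)) : Prop :=
  (∀ r ∈ A, r ≠ []) ∧ (∀ r ∈ B, 2 ≤ r.length)
instance (t : Int) (A : List (List Int)) (B : List (List Int)) : Decidable (Pre_numTrains t A B) := by unfold Pre_numTrains; infer_instance

def pvWitness_numTrains : Int × List (List Int) × List (List Int) := (5, [[3], [10]], [[0, 1], [0, 2]])

def Spec_numTrains (t : Int) (A : List (List Int)) (B : List (List Int)) (out : Int) : Prop := out = numTrains_alt t A B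
instance (t : Int) (A : List (List Int)) (B : List (List Int)) (out : Int) : Decidable (Spec_numTrains t A B out) := by unfold Spec_numTrains; infer_instance

-- ===== CLAIM (what is proved, stated in full; the proofs are below) =====
def Claim_equal_numTrains : Prop := ∀ (t : Int) (A : List (List Int)) (B : List (List Int)), Dom_numTrains t A B → Pre_numTrains t A B → Spec_numTrains t A B (numTrains t A B)

-- ===== LEMMAS AND PROOFS =====

-- ===== VERDICT (by name: the statement is the Claim_ definition above) =====
-- A's pop-front loop on (arvs.drop j) computes the same count as B's index fold carrying j.
-- A's pop-front loop on (arvs.drop j) computes the same count as B's index fold carrying j.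
theorem pvLoop_eq (arvs : List Int) (ds : List Int) : ∀ (j : Nat) (res : Int),
    pvLoopA ds (arvs.drop j) res = (ds.foldl (pvStepB arvs) (j, res)).2 := by
  induction ds with
  | nil => intro j res; simp [pvLoopA]
  | cons d ds ih =>
    intro j res
    rcases h : arvs.drop j with _ | ⟨a, as⟩
    · have hlen : arvs.length ≤ j := List.drop_eq_nil_iff.mp h
      have hs : pvStepB arvs (j, res) d = (j, res + 1) := by
        simp [pvStepB, Nat.not_lt.mpr hlen]
      simp only [List.foldl_cons, hs, pvLoopA]
      rw [← ih j (res + 1), h]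
    · have hne : arvs.drop j ≠ [] := by rw [h]; exact List.cons_ne_nil a as
      have hj : j < arvs.length := by
        by_contra hc
        exact hne (List.drop_eq_nil_iff.mpr (Nat.le_of_not_lt hc))
      have hsome : arvs[j]? = some a := by rw [← List.head?_drop, h]; rfl
      have hget : arvs[j] = a := by
        have := List.getElem?_eq_getElem hj
        rw [hsome] at this; exact (Option.some_inj.mp this).symm
      by_cases hle : a ≤ d
      · have hs : pvStepB arvs (j, res) d = (j + 1, res) := by
          simp [pvStepB, hj, hget, hle]
        have hdrop : arvs.drop (j + 1) = as := by rw [← List.tail_drop, h]; rfl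
        rw [List.foldl_cons, hs]
        simp only [pvLoopA, if_pos hle]
        rw [← ih (j + 1) res, hdrop]
      · have hs : pvStepB arvs (j, res) d = (j, res + 1) := by
          simp [pvStepB, hj, hget, hle]
        rw [List.foldl_cons, hs]
        simp only [pvLoopA, if_neg hle]
        rw [← ih j (res + 1), h]

theorem numTrains_spec : Claim_equal_numTrains := by
  intro t A B _ _
  unfold Spec_numTrains numTrains numTrains_alt
  rw [PySem.List.foldl_pyRange_zero_pyGetD' A [] (fun acc r => acc ++ [PySem.List.pyGetD r 0 0]) [],
      PySem.List.foldl_pyRange_zero_pyGetD' B [] (fun acc r => acc ++ [PySem.List.pyGetD r 1 0 + t]) [],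
      PySem.List.foldl_append_singleton_eq_map, PySem.List.foldl_append_singleton_eq_map]
  simpa using pvLoop_eq (PySem.List.sorted (B.map (fun r => PySem.List.pyGetD r 1 0 + t)) (fun x => x) false)
      (PySem.List.sorted (A.map (fun r => PySem.List.pyGetD r 0 0)) (fun x => x) false) 0 0
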